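-- pv_equiv track=rewrite | github.com/benkang-chen/Event-Extraction | ML/EventExtractionTemplateMatch/event_extraction.py | taking_location
-- ===== SOURCE A (Python) =====
-- def taking_location(nlp_result):
--     i = 0
--     state = False
--     location = ""
--     result = []
--     while i < len(nlp_result):
--         if (nlp_result[i][1] == 'LOCATION' or
--                 nlp_result[i][1] == 'FACILITY' or
--                 nlp_result[i][1] == 'CITY'):
--             location += nlp_result[i][0]
--             if state == False:
--                 state = True
--         else:
--             if state == True:
--                 result.append(location)
--                 location = ""
--                 state = False
--         i += 1
--     if state == True:
--         result.append(location)
--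
--     result = list(set(result))
--
--     return result
-- ===== SOURCE B (Python) =====
-- def taking_location(nlp_result):
--     # Run-based scan: find each maximal consecutive run of location-tagged
--     # tokens, join its words, then deduplicate (no state flag / accumulator).
--     tags = ('LOCATION', 'FACILITY', 'CITY')
--     merged = []
--     i, n = 0, len(nlp_result)
--     while i < n:
--         if nlp_result[i][1] in tags:
--             j = i
--             while j < n and nlp_result[j][1] in tags:
--                 j += 1
--             merged.append(''.join(word for word, _ in nlp_result[i:j]))
--             i = j
--         else:
--             i += 1
--     return list(set(merged))
-- ===== Notes on version B (the rewrite author's own statement) =====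
-- stated objective: simpler
-- what changed: Replaced A's token-by-token state machine (state flag plus growing location accumulator) by a run-based scan that finds each maximal consecutive run of location-tagged tokens and joins its words directly, keeping the same final set-dedup.
import Mathlib
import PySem

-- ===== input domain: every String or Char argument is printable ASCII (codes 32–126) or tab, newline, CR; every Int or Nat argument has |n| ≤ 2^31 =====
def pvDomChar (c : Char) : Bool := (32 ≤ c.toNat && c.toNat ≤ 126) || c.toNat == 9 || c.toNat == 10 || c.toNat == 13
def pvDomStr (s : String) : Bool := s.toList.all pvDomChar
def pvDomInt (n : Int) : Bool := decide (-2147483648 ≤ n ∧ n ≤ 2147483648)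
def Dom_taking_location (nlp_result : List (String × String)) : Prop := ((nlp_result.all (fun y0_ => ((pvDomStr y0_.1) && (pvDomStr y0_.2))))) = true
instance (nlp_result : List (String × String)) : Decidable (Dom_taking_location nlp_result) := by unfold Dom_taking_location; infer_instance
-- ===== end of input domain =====

-- B replaces A's one-token-at-a-time state machine by a run-based scan
-- (maximal consecutive location runs, joined and collected); objective: simpler.
-- dedup order of list(set(...)) is hash-dependent in Python; outputs are set-valued.

-- ===== PORT A =====
-- A's while loop: index i becomes structural recursion, carrying A's
-- (state, location, result) variables; the trailing 'if state' flush is the [] case.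
def taking_location_loop : List (String × String) → Bool → String → List String → List String
  | [], state, location, result => if state then result ++ [location] else result
  | tok :: rest, state, location, result =>
    if tok.2 == "LOCATION" || tok.2 == "FACILITY" || tok.2 == "CITY" then
      taking_location_loop rest true (location ++ tok.1) result
    else if state then
      taking_location_loop rest false "" (result ++ [location])
    else
      taking_location_loop rest state location result

def taking_location (nlp_result : List (String × String)) : List String :=
  PySem.Set.ofList (taking_location_loop nlp_result false "" [])

-- ===== PORT B =====
-- B's 'tok[1] in tags' test
def pvIsLoc (tok : String × String) : Bool :=
  tok.2 == "LOCATION" || tok.2 == "FACILITY" || tok.2 == "CITY"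

-- B's outer while: skip a non-location token, or consume the maximal location
-- run (inner while = takeWhile / dropWhile) and join its words.
def pvRunsB : List (String × String) → List String
  | [] => []
  | tok :: rest =>
    if pvIsLoc tok then
      PySem.Str.join "" ((tok :: rest.takeWhile pvIsLoc).map Prod.fst)
        :: pvRunsB (rest.dropWhile pvIsLoc)
    else
      pvRunsB rest
termination_by l => l.length
decreasing_by
  · exact Nat.lt_succ_of_le (List.length_dropWhile_le _ _)
  · simp

def taking_location_alt (nlp_result : List (String × String)) : List String :=
  PySem.Set.ofList (pvRunsB nlp_result)

-- ===== PRECONDITION & SPEC =====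
def Spec_taking_location (nlp_result : List (String × String)) (out : List String) : Prop := out = taking_location_alt nlp_result
instance (nlp_result : List (String × String)) (out : List String) : Decidable (Spec_taking_location nlp_result out) := by unfold Spec_taking_location; infer_instance

-- ===== CLAIM (what is proved, stated in full; the proofs are below) =====
def Claim_equal_taking_location : Prop := ∀ (nlp_result : List (String × String)), Dom_taking_location nlp_result → Spec_taking_location nlp_result (taking_location nlp_result)

-- ===== LEMMAS AND PROOFS =====

theorem pv_join_nil : PySem.Str.join "" ([] : List String) = "" := by
  apply String.ext
  rw [PySem.Str.toList_join]
  simp [PySem.Chars.join_nil]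

theorem pv_join_cons (s : String) (l : List String) :
    PySem.Str.join "" (s :: l) = s ++ PySem.Str.join "" l := by
  apply String.ext
  rw [PySem.Str.toList_join, String.toList_append, PySem.Str.toList_join]
  cases l with
  | nil => simp [PySem.Chars.join_singleton, PySem.Chars.join_nil]
  | cons t r => rw [List.map_cons, List.map_cons, PySem.Chars.join_cons_cons]; simp

-- consuming a run of location tokens appends their joined words to A's accumulator
theorem pv_loop_run (ys : List (String × String)) :
    (∀ y ∈ ys, pvIsLoc y = true) → ∀ (rest : List (String × String)) (acc : String) (res : List String),
    taking_location_loop (ys ++ rest) true acc res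
      = taking_location_loop rest true (acc ++ PySem.Str.join "" (ys.map Prod.fst)) res := by
  induction ys with
  | nil => intro _ rest acc res; simp [pv_join_nil]
  | cons y ys ih =>
    intro h rest acc res
    have hy : (y.2 == "LOCATION" || y.2 == "FACILITY" || y.2 == "CITY") = true :=
      h y (List.mem_cons_self)
    rw [List.cons_append, taking_location_loop, if_pos hy,
        ih (fun z hz => h z (List.mem_cons_of_mem _ hz)) rest (acc ++ y.1) res,
        List.map_cons, pv_join_cons, String.append_assoc]

theorem pv_isLoc_false_step (tok : String × String) (rest : List (String × String))
    (res : List String) (h : pvIsLoc tok = false) :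
    taking_location_loop (tok :: rest) false "" res = taking_location_loop rest false "" res := by
  rw [taking_location_loop, if_neg (by simpa [pvIsLoc] using h)]
  simp

theorem pv_main : ∀ (n : Nat) (nlp : List (String × String)), nlp.length ≤ n →
    ∀ (res : List String),
    taking_location_loop nlp false "" res = res ++ pvRunsB nlp := by
  intro n
  induction n with
  | zero =>
    intro nlp hn res
    have : nlp = [] := List.eq_nil_of_length_eq_zero (Nat.le_zero.mp hn)
    subst this
    simp [taking_location_loop, pvRunsB]
  | succ n ih =>
    intro nlp hn res
    cases nlp with
    | nil => simp [taking_location_loop, pvRunsB]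
    | cons tok rest =>
      by_cases h : pvIsLoc tok = true
      · -- the token opens a maximal location run
        have hrest : rest.takeWhile pvIsLoc ++ rest.dropWhile pvIsLoc = rest :=
          List.takeWhile_append_dropWhile
        have hstep : taking_location_loop (tok :: rest) false "" res
            = taking_location_loop rest true ("" ++ tok.1) res := by
          rw [taking_location_loop, if_pos (by simpa [pvIsLoc] using h)]
        rw [hstep]
        conv_lhs => rw [← hrest]
        rw [pv_loop_run (rest.takeWhile pvIsLoc) (fun z hz => List.mem_takeWhile_imp hz)]
        have hacc : "" ++ tok.1 ++ PySem.Str.join "" ((rest.takeWhile pvIsLoc).map Prod.fst)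
            = PySem.Str.join "" ((tok :: rest.takeWhile pvIsLoc).map Prod.fst) := by
          rw [List.map_cons, pv_join_cons, String.empty_append]
        rw [hacc]
        have hruns : pvRunsB (tok :: rest)
            = PySem.Str.join "" ((tok :: rest.takeWhile pvIsLoc).map Prod.fst)
              :: pvRunsB (rest.dropWhile pvIsLoc) := by
          rw [pvRunsB, if_pos h]
        rw [hruns]
        cases hdw : rest.dropWhile pvIsLoc with
        | nil => rw [taking_location_loop]; simp [pvRunsB]
        | cons r rs =>
          have hr : pvIsLoc r = false := by
            have := List.head?_dropWhile_not pvIsLoc rest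
            rw [hdw] at this; simpa using this
          have hlen : rs.length ≤ n := by
            have h1 : (rest.dropWhile pvIsLoc).length ≤ rest.length :=
              List.length_dropWhile_le _ _
            rw [hdw] at h1
            simp only [List.length_cons] at hn h1
            omega
          rw [taking_location_loop, if_neg (by simpa [pvIsLoc] using hr), if_pos rfl,
              ih rs hlen]
          have : pvRunsB (r :: rs) = pvRunsB rs := by rw [pvRunsB, if_neg (by simp [hr])]
          rw [this]; simp
      · -- non-location token: A skips it, B recurses past it
        have hlen : rest.length ≤ n := by
          simp only [List.length_cons] at hn; omega
        rw [pv_isLoc_false_step tok rest res (by simpa using h), ih rest hlen res,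
            pvRunsB, if_neg h]

-- ===== VERDICT (by name: the statement is the Claim_ definition above) =====
theorem taking_location_spec : Claim_equal_taking_location := by
  intro nlp _
  unfold Spec_taking_location taking_location taking_location_alt
  rw [pv_main nlp.length nlp (Nat.le_refl _) []]
  simp
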